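-- pv_equiv track=rewrite | github.com/agnee008/daily_dsa_python | VISA_roound_trip_calculation.py | find_last_round_trip
-- ===== SOURCE A (Python) =====
-- def find_last_round_trip(trips, a2b, b2a):
--     # Initialize current time and trips completed
--     current_time = 0
--     trips_completed = 0
--
--     while trips_completed < trips:
--         # Find the next flight from A to B that departs after or at current_time
--         for departure in a2b:
--             if departure >= current_time:
--                 current_time = departure + 100  # Time to reach B
--                 break
--
--         # Find the next flight from B to A that departs after reaching B
--         for departure in b2a:
--             if departure >= current_time:
--                 current_time = departure + 100  # Time to reach A
--                 break
--
--         # Increment the number of trips completed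
--         trips_completed += 1
--
--     return current_time
-- ===== SOURCE B (Python) =====
-- def find_last_round_trip(trips, a2b, b2a):
--     # Precompute the strict prefix-maxima of each schedule: the first element
--     # >= t in list order is always the first prefix-maximum >= t, and the
--     # prefix-maxima form a strictly increasing list, so each trip's scan
--     # becomes a binary search.  Stop early once a trip makes no progress.
--     def prefix_maxima(xs):
--         out = []
--         for x in xs:
--             if not out or x > out[-1]:
--                 out.append(x)
--         return out
--
--     def lower_bound(arr, x):
--         lo, hi = 0, len(arr)
--         while lo < hi:
--             mid = (lo + hi) // 2
--             if arr[mid] < x: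
--                 lo = mid + 1
--             else:
--                 hi = mid
--         return lo
--
--     pa = prefix_maxima(a2b)
--     pb = prefix_maxima(b2a)
--     t = 0
--     remaining = trips
--     while remaining > 0:
--         nt = t
--         i = lower_bound(pa, nt)
--         if i < len(pa):
--             nt = pa[i] + 100
--         j = lower_bound(pb, nt)
--         if j < len(pb):
--             nt = pb[j] + 100
--         if nt == t:
--             break
--         t = nt
--         remaining -= 1
--     return t
-- ===== Notes on version B (the rewrite author's own statement) =====
-- stated objective: faster
-- what changed: B precomputes the strict prefix-maxima of each schedule once (the first element >= t in list order is always the first prefix-maximum >= t), replaces each trip's linear scan by a binary search on these increasing lists, and stops early once a trip makes no progress.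
import Mathlib
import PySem

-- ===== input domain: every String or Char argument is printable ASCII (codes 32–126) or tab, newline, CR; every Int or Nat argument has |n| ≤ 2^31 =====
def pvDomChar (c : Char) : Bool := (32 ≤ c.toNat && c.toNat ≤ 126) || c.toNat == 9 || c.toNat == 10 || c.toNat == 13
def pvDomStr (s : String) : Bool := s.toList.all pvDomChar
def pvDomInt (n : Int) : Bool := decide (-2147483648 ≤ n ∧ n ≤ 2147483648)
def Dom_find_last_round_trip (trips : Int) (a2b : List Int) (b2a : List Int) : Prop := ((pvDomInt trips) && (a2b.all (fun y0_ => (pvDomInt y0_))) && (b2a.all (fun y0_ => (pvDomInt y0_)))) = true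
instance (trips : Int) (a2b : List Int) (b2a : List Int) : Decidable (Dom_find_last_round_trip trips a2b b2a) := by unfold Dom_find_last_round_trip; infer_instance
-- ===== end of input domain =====

-- B replaces A's per-trip linear scans by binary search on the precomputed
-- strict prefix-maxima of each schedule, stopping early at a fixed point (faster).

-- ===== PORT A =====
-- 'for departure in xs: if departure >= t: t = departure + 100; break'
def pvFindDep (t : Int) (xs : List Int) : Int :=
  match xs with
  | [] => t
  | d :: rest => if d ≥ t then d + 100 else pvFindDep t rest

-- the 'while trips_completed < trips' loop, counted down
def pvGoA (a2b b2a : List Int) : Nat → Int → Int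
  | 0, t => t
  | n + 1, t => pvGoA a2b b2a n (pvFindDep (pvFindDep t a2b) b2a)

def find_last_round_trip (trips : Int) (a2b : List Int) (b2a : List Int) : Int :=
  pvGoA a2b b2a trips.toNat 0

-- ===== PORT B =====
-- Source B's prefix_maxima: append x when out is empty or x > out[-1]
def pvPrefixMaxima (xs : List Int) : List Int :=
  xs.foldl (fun out x =>
    match out.getLast? with
    | none => out ++ [x]
    | some m => if x > m then out ++ [x] else out) []

-- Source B's lower_bound while-loop
def pvLbGo (arr : List Int) (x : Int) : Nat → Nat → Nat → Nat
  | 0, lo, _ => lo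
  | fuel + 1, lo, hi =>
    if lo < hi then
      let mid := (lo + hi) / 2
      if arr.getD mid 0 < x then pvLbGo arr x fuel (mid + 1) hi
      else pvLbGo arr x fuel lo mid
    else lo

def pvLowerBound (arr : List Int) (x : Int) : Nat := pvLbGo arr x arr.length 0 arr.length

-- one iteration of Source B's while-loop body (the value nt)
def pvStepB (pa pb : List Int) (t : Int) : Int :=
  let i := pvLowerBound pa t
  let nt := if i < pa.length then pa.getD i 0 + 100 else t
  let j := pvLowerBound pb nt
  if j < pb.length then pb.getD j 0 + 100 else nt

-- the 'while remaining > 0' loop with the early break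
def pvGoB (pa pb : List Int) : Nat → Int → Int
  | 0, t => t
  | n + 1, t =>
    let nt := pvStepB pa pb t
    if nt = t then t else pvGoB pa pb n nt

def find_last_round_trip_alt (trips : Int) (a2b : List Int) (b2a : List Int) : Int :=
  pvGoB (pvPrefixMaxima a2b) (pvPrefixMaxima b2a) trips.toNat 0

-- ===== PRECONDITION & SPEC =====
def Spec_find_last_round_trip (trips : Int) (a2b : List Int) (b2a : List Int) (out : Int) : Prop := out = find_last_round_trip_alt trips a2b b2a
instance (trips : Int) (a2b : List Int) (b2a : List Int) (out : Int) : Decidable (Spec_find_last_round_trip trips a2b b2a out) := by unfold Spec_find_last_round_trip; infer_instance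

-- ===== CLAIM (what is proved, stated in full; the proofs are below) =====
def Claim_equal_find_last_round_trip : Prop := ∀ (trips : Int) (a2b : List Int) (b2a : List Int), Dom_find_last_round_trip trips a2b b2a → Spec_find_last_round_trip trips a2b b2a (find_last_round_trip trips a2b b2a)

-- ===== LEMMAS AND PROOFS =====

-- recursive characterisation of pvPrefixMaxima (proof-only)
def pmRec (m : Option Int) : List Int → List Int
  | [] => []
  | x :: r =>
    match m with
    | none => x :: pmRec (some x) r
    | some mm => if x > mm then x :: pmRec (some x) r else pmRec (some mm) r

theorem pm_foldl (xs : List Int) : ∀ (out : List Int),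
    xs.foldl (fun out x =>
      match out.getLast? with
      | none => out ++ [x]
      | some m => if x > m then out ++ [x] else out) out
      = out ++ pmRec out.getLast? xs := by
  induction xs with
  | nil => intro out; simp [pmRec]
  | cons x r ih =>
    intro out
    cases h : out.getLast? with
    | none =>
      have hout : out = [] := by
        cases out with
        | nil => rfl
        | cons a l => simp at h
      subst hout
      simp [List.foldl, pmRec, ih [x]]
    | some m =>
      by_cases hx : x > m
      · simp only [List.foldl, h, if_pos hx]
        rw [ih (out ++ [x])]
        simp [pmRec, h, hx]
      · simp only [List.foldl, h, if_neg hx]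
        rw [ih out, h]
        simp [pmRec, hx]

theorem pm_eq (xs : List Int) : pvPrefixMaxima xs = pmRec none xs := by
  simpa using pm_foldl xs []

-- pvFindDep via find?
theorem findDep_eq_find? (t : Int) (xs : List Int) :
    pvFindDep t xs = (match xs.find? (fun d => decide (t ≤ d)) with
      | some d => d + 100
      | none => t) := by
  induction xs with
  | nil => simp [pvFindDep]
  | cons d rest ih =>
    by_cases h : t ≤ d
    · simp [pvFindDep, List.find?, h]
    · simp [pvFindDep, List.find?, h, ih]

-- prefix-maxima preserve the first element ≥ t, as long as the running max is < t
theorem pm_find? (t : Int) (xs : List Int) : ∀ (m : Option Int),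
    (∀ mm, m = some mm → mm < t) →
    (pmRec m xs).find? (fun d => decide (t ≤ d)) = xs.find? (fun d => decide (t ≤ d)) := by
  induction xs with
  | nil => intro m _; simp [pmRec]
  | cons x r ih =>
    intro m hm
    by_cases hx : t ≤ x
    · cases m with
      | none => simp [pmRec, List.find?, hx]
      | some mm =>
        have : x > mm := lt_of_lt_of_le (hm mm rfl) hx
        simp [pmRec, this, List.find?, hx]
    · have hx' : x < t := lt_of_not_ge hx
      cases m with
      | none =>
        simp only [pmRec, List.find?, hx]
        exact ih (some x) (by intro mm h; cases h; exact hx')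
      | some mm =>
        by_cases hxm : x > mm
        · simp only [pmRec, if_pos hxm, List.find?, decide_eq_false hx]
          exact ih (some x) (by intro mm' h; cases h; exact hx')
        · simp only [pmRec, if_neg hxm, List.find?, decide_eq_false hx]
          exact ih (some mm) hm

-- prefix-maxima are strictly increasing
theorem pm_chain (xs : List Int) : ∀ (mm : Int),
    List.IsChain (· < ·) (mm :: pmRec (some mm) xs) := by
  induction xs with
  | nil => intro mm; simp [pmRec]
  | cons x r ih =>
    intro mm
    by_cases hx : x > mm
    · simp only [pmRec, if_pos hx]
      exact List.IsChain.cons_cons hx (ih x)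
    · simp only [pmRec, if_neg hx]
      exact ih mm

theorem pm_sorted (xs : List Int) : (pmRec none xs).Pairwise (· < ·) := by
  cases xs with
  | nil => simp [pmRec]
  | cons x r =>
    have h : List.IsChain (· < ·) (x :: pmRec (some x) r) := pm_chain r x
    exact List.isChain_iff_pairwise.1 h

theorem tw_len_le (p : Int → Bool) : ∀ (l : List Int), (l.takeWhile p).length ≤ l.length := by
  intro l
  induction l with
  | nil => simp
  | cons a r ih =>
    by_cases ha : p a
    · simpa [List.takeWhile, ha] using ih
    · simp [List.takeWhile, ha]

-- T = length of the (· < x) prefix; elements before T satisfy (< x)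
theorem tw_lt (x : Int) (arr : List Int) : ∀ (k : Nat),
    k < (arr.takeWhile (fun d => decide (d < x))).length → arr.getD k 0 < x := by
  induction arr with
  | nil => intro k h; simp at h
  | cons a r ih =>
    intro k h
    by_cases ha : a < x
    · cases k with
      | zero => simpa using ha
      | succ k' =>
        simp only [List.takeWhile, decide_eq_true ha, List.length_cons] at h
        simpa using ih k' (by omega)
    · simp [List.takeWhile, decide_eq_false ha] at h
-- elements at or past T are ≥ x, given sortedness
theorem tw_ge (x : Int) : ∀ (arr : List Int), arr.Pairwise (· < ·) →
    ∀ (k : Nat), (arr.takeWhile (fun d => decide (d < x))).length ≤ k → k < arr.length →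
    ¬ arr.getD k 0 < x := by
  intro arr
  induction arr with
  | nil => intro _ k _ h; simp at h
  | cons a r ih =>
    intro hs k hT hk
    by_cases ha : a < x
    · simp only [List.takeWhile, decide_eq_true ha, List.length_cons] at hT
      cases k with
      | zero => omega
      | succ k' =>
        simpa using ih (List.Pairwise.of_cons hs) k' (by omega) (by simpa using hk)
    · -- a ≥ x and everything after a is > a
      cases k with
      | zero => simpa using ha
      | succ k' =>
        have hmem : r.getD k' 0 ∈ r := by
          have hk' : k' < r.length := by simpa using hk
          rw [List.getD_eq_getElem r 0 hk']
          exact List.getElem_mem hk'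
        have : a < r.getD k' 0 := (List.pairwise_cons.1 hs).1 _ hmem
        have hax : x ≤ a := le_of_not_gt ha
        simp only [List.getD_cons_succ]
        omega

-- find? in terms of T (no sortedness needed)
theorem find?_eq_T (x : Int) : ∀ (arr : List Int),
    arr.find? (fun d => decide (x ≤ d)) =
      (if h : (arr.takeWhile (fun d => decide (d < x))).length < arr.length
       then some (arr.getD (arr.takeWhile (fun d => decide (d < x))).length 0)
       else none) := by
  intro arr
  induction arr with
  | nil => simp
  | cons a r ih =>
    by_cases ha : a < x
    · have hna : ¬ x ≤ a := not_le_of_gt ha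
      simp only [List.find?, decide_eq_false hna, List.takeWhile, decide_eq_true ha,
        List.length_cons]
      rw [ih]
      by_cases h : (r.takeWhile (fun d => decide (d < x))).length < r.length
      · rw [dif_pos h, dif_pos (by simpa using Nat.succ_lt_succ h)]
        simp
      · rw [dif_neg h, dif_neg (by simp; omega)]
    · have hxa : x ≤ a := le_of_not_gt ha
      simp [List.find?, decide_eq_true hxa, List.takeWhile, decide_eq_false ha]

-- binary-search correctness: pvLbGo lands exactly on T
theorem lbGo_eq (arr : List Int) (x : Int) (hs : arr.Pairwise (· < ·)) :
    ∀ (fuel lo hi : Nat),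
      hi - lo ≤ fuel →
      lo ≤ (arr.takeWhile (fun d => decide (d < x))).length →
      (arr.takeWhile (fun d => decide (d < x))).length ≤ hi →
      hi ≤ arr.length →
      pvLbGo arr x fuel lo hi = (arr.takeWhile (fun d => decide (d < x))).length := by
  intro fuel
  induction fuel with
  | zero =>
    intro lo hi hf h1 h2 _
    simp only [pvLbGo]
    omega
  | succ fuel ih =>
    intro lo hi hf h1 h2 h3
    by_cases h : lo < hi
    · rw [pvLbGo, if_pos h]
      by_cases hlt : arr.getD ((lo + hi) / 2) 0 < x
      · rw [if_pos hlt]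
        have hmidT : (lo + hi) / 2 < (arr.takeWhile (fun d => decide (d < x))).length := by
          by_contra hc
          exact tw_ge x arr hs ((lo + hi) / 2) (by omega) (by omega) hlt
        exact ih ((lo + hi) / 2 + 1) hi (by omega) (by omega) h2 h3
      · rw [if_neg hlt]
        have hTmid : (arr.takeWhile (fun d => decide (d < x))).length ≤ (lo + hi) / 2 := by
          by_contra hc
          rw [Nat.not_le] at hc
          exact hlt (tw_lt x arr ((lo + hi) / 2) hc)
        exact ih lo ((lo + hi) / 2) (by omega) h1 hTmid (by omega)
    · rw [pvLbGo, if_neg h]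
      omega

theorem lowerBound_eq (arr : List Int) (x : Int) (hs : arr.Pairwise (· < ·)) :
    pvLowerBound arr x = (arr.takeWhile (fun d => decide (d < x))).length := by
  unfold pvLowerBound
  exact lbGo_eq arr x hs arr.length 0 arr.length (by omega) (Nat.zero_le _)
    (tw_len_le _ arr) le_rfl

-- the key step equality: binary search on prefix-maxima = A's linear scan
theorem key (t : Int) (xs : List Int) :
    (if pvLowerBound (pvPrefixMaxima xs) t < (pvPrefixMaxima xs).length
     then (pvPrefixMaxima xs).getD (pvLowerBound (pvPrefixMaxima xs) t) 0 + 100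
     else t) = pvFindDep t xs := by
  rw [pm_eq, lowerBound_eq _ _ (pm_sorted xs), findDep_eq_find?,
     ← pm_find? t xs none (by intro mm h; cases h), find?_eq_T]
  by_cases h : ((pmRec none xs).takeWhile (fun d => decide (d < t))).length < (pmRec none xs).length
  · rw [dif_pos h, if_pos h]
  · rw [dif_neg h, if_neg h]

theorem stepB_eq (a2b b2a : List Int) (t : Int) :
    pvStepB (pvPrefixMaxima a2b) (pvPrefixMaxima b2a) t
      = pvFindDep (pvFindDep t a2b) b2a := by
  simp only [pvStepB]
  rw [key t a2b]
  exact key (pvFindDep t a2b) b2a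

-- a fixed point of the step stays fixed under A's loop
theorem goA_fix (a2b b2a : List Int) (t : Int)
    (h : pvFindDep (pvFindDep t a2b) b2a = t) :
    ∀ n, pvGoA a2b b2a n t = t := by
  intro n
  induction n with
  | zero => rfl
  | succ n ih => simp only [pvGoA, h, ih]

theorem go_eq (a2b b2a : List Int) : ∀ (n : Nat) (t : Int),
    pvGoB (pvPrefixMaxima a2b) (pvPrefixMaxima b2a) n t = pvGoA a2b b2a n t := by
  intro n
  induction n with
  | zero => intro t; rfl
  | succ n ih =>
    intro t
    simp only [pvGoB, pvGoA, stepB_eq]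
    by_cases h : pvFindDep (pvFindDep t a2b) b2a = t
    · rw [if_pos h, h, goA_fix a2b b2a t h]
    · rw [if_neg h, ih]

-- ===== VERDICT (by name: the statement is the Claim_ definition above) =====
theorem find_last_round_trip_spec : Claim_equal_find_last_round_trip := by
  intro trips a2b b2a _
  unfold Spec_find_last_round_trip find_last_round_trip find_last_round_trip_alt
  exact (go_eq a2b b2a trips.toNat 0).symm
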